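-- pv_equiv track=rewrite | github.com/shudeepta-gh/Academic-courses | CSE220/Python/lab5/Task2.py | task2F_recursive
-- ===== SOURCE A (Python) =====
-- def task2F_recursive( arr, i=0, oddProduct=1, sumEven=0 ):
--     if(i >= 0 and i < len(arr)):
--       if(arr[i] % 2 == 0):
--         sumEven += arr[i]
--       else:
--         oddProduct *= arr[i]
--       return task2F_recursive(arr, i+1, oddProduct, sumEven)
--     return oddProduct - sumEven
-- ===== SOURCE B (Python) =====
-- def task2F_recursive(arr, i=0, oddProduct=1, sumEven=0):
--     if i < 0:
--         return oddProduct - sumEven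
--     for j in range(i, len(arr)):
--         if arr[j] % 2 == 0:
--             sumEven += arr[j]
--         else:
--             oddProduct *= arr[j]
--     return oddProduct - sumEven
-- ===== Notes on version B (the rewrite author's own statement) =====
-- stated objective: idiomatic
-- what changed: Replaced once-per-element recursion carrying accumulators with a single explicit loop over arr[i:] updating the two accumulators, after one guard for negative i.
import Mathlib
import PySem

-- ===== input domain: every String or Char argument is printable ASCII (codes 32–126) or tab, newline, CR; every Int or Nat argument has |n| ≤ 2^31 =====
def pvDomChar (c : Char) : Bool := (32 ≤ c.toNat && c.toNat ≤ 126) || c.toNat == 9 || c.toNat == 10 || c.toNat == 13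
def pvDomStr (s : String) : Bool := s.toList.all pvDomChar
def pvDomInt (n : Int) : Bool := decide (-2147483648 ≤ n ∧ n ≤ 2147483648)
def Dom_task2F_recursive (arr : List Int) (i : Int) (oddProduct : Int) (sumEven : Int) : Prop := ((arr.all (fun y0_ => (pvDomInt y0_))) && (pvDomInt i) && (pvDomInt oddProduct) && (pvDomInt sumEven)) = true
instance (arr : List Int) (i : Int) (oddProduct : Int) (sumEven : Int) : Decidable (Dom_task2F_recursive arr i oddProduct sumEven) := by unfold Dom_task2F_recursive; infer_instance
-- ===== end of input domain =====

-- B replaces the once-per-element recursion with one explicit fold over arr[i:] (idiomatic, O(1) space).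


-- ===== PORT A =====
-- literal transliteration of A's recursion: index i, two accumulators, one step per call
def task2F_recursive (arr : List Int) (i : Int) (oddProduct : Int) (sumEven : Int) : Int :=
  if h : 0 ≤ i ∧ i < arr.length then
    let x := arr.getD i.toNat 0    -- arr[i], in range by the guard
    if x % 2 = 0 then
      task2F_recursive arr (i + 1) oddProduct (sumEven + x)
    else
      task2F_recursive arr (i + 1) (oddProduct * x) sumEven
  else
    oddProduct - sumEven
termination_by arr.length - i.toNat
decreasing_by all_goals (obtain ⟨h0, h1⟩ := h; omega)

-- ===== PORT B =====
-- Source B: guard i < 0, then one loop over arr[i:] updating (oddProduct, sumEven)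
def task2F_recursive_alt (arr : List Int) (i : Int) (oddProduct : Int) (sumEven : Int) : Int :=
  if i < 0 then oddProduct - sumEven
  else
    let ps := (arr.drop i.toNat).foldl
      (fun (acc : Int × Int) x => if x % 2 = 0 then (acc.1, acc.2 + x) else (acc.1 * x, acc.2))
      (oddProduct, sumEven)
    ps.1 - ps.2

-- ===== PRECONDITION & SPEC =====
def Spec_task2F_recursive (arr : List Int) (i : Int) (oddProduct : Int) (sumEven : Int) (out : Int) : Prop := out = task2F_recursive_alt arr i oddProduct sumEven
instance (arr : List Int) (i : Int) (oddProduct : Int) (sumEven : Int) (out : Int) : Decidable (Spec_task2F_recursive arr i oddProduct sumEven out) := by unfold Spec_task2F_recursive; infer_instance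

-- ===== CLAIM (what is proved, stated in full; the proofs are below) =====
def Claim_equal_task2F_recursive : Prop := ∀ (arr : List Int) (i : Int) (oddProduct : Int) (sumEven : Int), Dom_task2F_recursive arr i oddProduct sumEven → Spec_task2F_recursive arr i oddProduct sumEven (task2F_recursive arr i oddProduct sumEven)

-- ===== LEMMAS AND PROOFS =====

-- For nonnegative i, A's recursion computes the fold over arr.drop i.toNat.
lemma task2F_eq_fold (arr : List Int) (i oddProduct sumEven : Int) (hi : 0 ≤ i) :
    task2F_recursive arr i oddProduct sumEven =
      ((arr.drop i.toNat).foldl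
        (fun (acc : Int × Int) x => if x % 2 = 0 then (acc.1, acc.2 + x) else (acc.1 * x, acc.2))
        (oddProduct, sumEven)).1 -
      ((arr.drop i.toNat).foldl
        (fun (acc : Int × Int) x => if x % 2 = 0 then (acc.1, acc.2 + x) else (acc.1 * x, acc.2))
        (oddProduct, sumEven)).2 := by
  by_cases hlt : i < arr.length
  · have hn : i.toNat < arr.length := by omega
    have hdrop : arr.drop i.toNat = arr[i.toNat] :: arr.drop (i.toNat + 1) :=
      List.drop_eq_getElem_cons hn
    have hx : arr.getD i.toNat 0 = arr[i.toNat] := List.getD_eq_getElem arr 0 hn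
    rw [task2F_recursive]
    simp only [hi, hlt, and_self, dite_true]
    have ht : (i + 1).toNat = i.toNat + 1 := by omega
    by_cases hp : arr[i.toNat] % 2 = 0
    · rw [if_pos (by rw [hx]; exact hp)]
      rw [task2F_eq_fold arr (i + 1) oddProduct (sumEven + arr.getD i.toNat 0) (by omega)]
      rw [ht, hdrop, List.foldl_cons]
      simp [List.getElem?_eq_getElem hn, hp]
    · rw [if_neg (by rw [hx]; exact hp)]
      rw [task2F_eq_fold arr (i + 1) (oddProduct * arr.getD i.toNat 0) sumEven (by omega)]
      rw [ht, hdrop, List.foldl_cons]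
      simp [List.getElem?_eq_getElem hn, hp]
  · rw [task2F_recursive]
    have : ¬ (0 ≤ i ∧ i < arr.length) := by omega
    simp only [this, dite_false]
    have : arr.drop i.toNat = [] := List.drop_eq_nil_of_le (by omega)
    simp [this]
termination_by arr.length - i.toNat
decreasing_by all_goals omega

-- ===== VERDICT (by name: the statement is the Claim_ definition above) =====
theorem task2F_recursive_spec : Claim_equal_task2F_recursive := by
  intro arr i oddProduct sumEven _
  unfold Spec_task2F_recursive task2F_recursive_alt
  by_cases hneg : i < 0
  · rw [task2F_recursive]
    have : ¬ (0 ≤ i ∧ i < arr.length) := by omega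
    simp [this, hneg]
  · rw [if_neg hneg]
    exact task2F_eq_fold arr i oddProduct sumEven (by omega)
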